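-- pv_equiv track=rewrite | github.com/rowanhm/cygnet | omw_conversion/convert_wn_to_xml.py | _encode_for_xml_id
-- ===== SOURCE A (Python) =====
-- def _encode_for_xml_id(text):
--     """
--     Convert any Unicode string to a safe XML ID format with one-to-one correspondence.
--     Each unique input string produces a unique output key.
--
--     Encoding rules:
--     - ASCII letters (a-z, A-Z): pass through unchanged
--     - ASCII digits (0-9): pass through unchanged
--     - Everything else (including punctuation, spaces, non-ASCII Unicode): encode as xHHHH
--       where HHHH is the 4-digit uppercase hex Unicode codepoint
--     """
--     encoded = []
--     for char in text:
--         # Only allow ASCII alphanumeric (a-z, A-Z, 0-9)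
--         if ('a' <= char <= 'z') or ('A' <= char <= 'Z') or ('0' <= char <= '9'):
--             encoded.append(char)
--         else:
--             # Encode everything else as x followed by 4-digit hex codepoint
--             hex_val = f"{ord(char):04X}"
--             encoded.append(f"x{hex_val}")
--
--     return ''.join(encoded)
-- ===== SOURCE B (Python) =====
-- def _encode_for_xml_id(text):
--     # Run-based scan: copy maximal alphanumeric runs whole, escape the single
--     # delimiter character after each run, repeat.
--     pieces = []
--     i = 0
--     n = len(text)
--     while i < n:
--         j = i
--         while j < n and ('a' <= text[j] <= 'z' or 'A' <= text[j] <= 'Z' or '0' <= text[j] <= '9'):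
--             j += 1
--         pieces.append(text[i:j])
--         if j < n:
--             pieces.append("x%04X" % ord(text[j]))
--             j += 1
--         i = j
--     return "".join(pieces)
-- ===== Notes on version B (the rewrite author's own statement) =====
-- stated objective: alternative
-- what changed: Replaced A's per-character append loop with a two-pointer run scanner: each maximal alphanumeric run is sliced out whole and appended as one piece, and only the single delimiter character after it is hex-escaped.
import Mathlib
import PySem

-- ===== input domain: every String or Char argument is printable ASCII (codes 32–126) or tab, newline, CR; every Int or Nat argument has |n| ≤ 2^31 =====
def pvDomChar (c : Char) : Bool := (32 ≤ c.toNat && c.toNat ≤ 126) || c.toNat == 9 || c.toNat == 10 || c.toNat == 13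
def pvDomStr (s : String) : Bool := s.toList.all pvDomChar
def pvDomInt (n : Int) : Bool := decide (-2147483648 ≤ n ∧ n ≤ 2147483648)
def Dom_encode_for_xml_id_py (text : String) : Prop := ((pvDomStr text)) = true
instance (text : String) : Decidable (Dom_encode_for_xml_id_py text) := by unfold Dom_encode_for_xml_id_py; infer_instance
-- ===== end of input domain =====

-- B replaces A's per-character append loop with a two-pointer run scanner (alternative decomposition); same values everywhere.

-- shared helper: "{:04X}".format(n) / "%04X" % n, exact for n < 0x10000 (all Dom characters)
def pvHexDigit (n : Nat) : Char := if n < 10 then Char.ofNat (48 + n) else Char.ofNat (55 + n)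
def pvHex4 (n : Nat) : List Char :=
  [pvHexDigit (n / 4096 % 16), pvHexDigit (n / 256 % 16), pvHexDigit (n / 16 % 16), pvHexDigit (n % 16)]

-- ===== PORT A =====
-- A: build a list of pieces with an explicit per-character loop, then ''.join
def encode_for_xml_id_py (text : String) : String :=
  let encoded : List (List Char) :=
    text.toList.foldl (fun acc c =>
      if ('a' ≤ c ∧ c ≤ 'z') ∨ ('A' ≤ c ∧ c ≤ 'Z') ∨ ('0' ≤ c ∧ c ≤ '9') then
        acc ++ [[c]]
      else
        acc ++ ['x' :: pvHex4 c.toNat]) []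
  String.ofList encoded.flatten

-- ===== PORT B =====
-- B: two-pointer run scanner — the inner while (advance j over alphanumerics) is the
-- takeWhile/dropWhile split of the remaining suffix; the slice text[i:j] is appended
-- whole, the delimiter text[j] (if any) is escaped, and the outer while continues on
-- the suffix after it.
def pvIsAl (c : Char) : Bool := ('a' ≤ c && c ≤ 'z') || ('A' ≤ c && c ≤ 'Z') || ('0' ≤ c && c ≤ '9')

def pvScan (cs : List Char) : List (List Char) :=
  match h : cs.dropWhile pvIsAl with
  | [] => [cs.takeWhile pvIsAl]
  | c :: rest => cs.takeWhile pvIsAl :: ('x' :: pvHex4 c.toNat) :: pvScan rest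
termination_by cs.length
decreasing_by
  have := List.length_dropWhile_le pvIsAl cs
  rw [h] at this
  simpa using Nat.lt_of_lt_of_le (Nat.lt_succ_self _) this

def encode_for_xml_id_py_alt (text : String) : String :=
  String.ofList (pvScan text.toList).flatten

-- ===== PRECONDITION & SPEC =====
def Spec_encode_for_xml_id_py (text : String) (out : String) : Prop := out = encode_for_xml_id_py_alt text
instance (text : String) (out : String) : Decidable (Spec_encode_for_xml_id_py text out) := by unfold Spec_encode_for_xml_id_py; infer_instance

-- ===== CLAIM (what is proved, stated in full; the proofs are below) =====
def Claim_equal_encode_for_xml_id_py : Prop := ∀ (text : String), Dom_encode_for_xml_id_py text → Spec_encode_for_xml_id_py text (encode_for_xml_id_py text)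

-- ===== LEMMAS AND PROOFS =====

-- the common normal form: per-character flatMap
def pvEnc (c : Char) : List Char :=
  if ('a' ≤ c ∧ c ≤ 'z') ∨ ('A' ≤ c ∧ c ≤ 'Z') ∨ ('0' ≤ c ∧ c ≤ '9') then [c]
  else 'x' :: pvHex4 c.toNat

theorem pvIsAl_iff (c : Char) :
    pvIsAl c = true ↔ (('a' ≤ c ∧ c ≤ 'z') ∨ ('A' ≤ c ∧ c ≤ 'Z') ∨ ('0' ≤ c ∧ c ≤ '9')) := by
  simp [pvIsAl, or_assoc]

-- A's loop state flattened equals the flatMap normal form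
theorem pv_fold_flatten (cs : List Char) :
    (cs.foldl (fun acc c =>
      if ('a' ≤ c ∧ c ≤ 'z') ∨ ('A' ≤ c ∧ c ≤ 'Z') ∨ ('0' ≤ c ∧ c ≤ '9') then
        acc ++ [[c]]
      else
        acc ++ ['x' :: pvHex4 c.toNat]) []).flatten
    = cs.flatMap pvEnc := by
  have h : ∀ (cs : List Char) (acc : List (List Char)),
      (cs.foldl (fun acc c =>
        if ('a' ≤ c ∧ c ≤ 'z') ∨ ('A' ≤ c ∧ c ≤ 'Z') ∨ ('0' ≤ c ∧ c ≤ '9') then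
          acc ++ [[c]]
        else
          acc ++ ['x' :: pvHex4 c.toNat]) acc).flatten
      = acc.flatten ++ cs.flatMap pvEnc := by
    intro cs
    induction cs with
    | nil => intro acc; simp
    | cons c cs ih =>
      intro acc
      by_cases hc : ('a' ≤ c ∧ c ≤ 'z') ∨ ('A' ≤ c ∧ c ≤ 'Z') ∨ ('0' ≤ c ∧ c ≤ '9')
      · rw [List.foldl_cons, if_pos hc, ih, List.flatMap_cons]
        simp [pvEnc, if_pos hc]
      · rw [List.foldl_cons, if_neg hc, ih, List.flatMap_cons]
        simp [pvEnc, if_neg hc]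
  simpa using h cs []

-- a run of alphanumerics is its own flatMap image
theorem pv_flatMap_run (cs : List Char) (hall : ∀ c ∈ cs, pvIsAl c = true) :
    cs.flatMap pvEnc = cs := by
  induction cs with
  | nil => rfl
  | cons c cs ih =>
    have hc := (pvIsAl_iff c).mp (hall c (List.mem_cons_self))
    rw [List.flatMap_cons, ih (fun d hd => hall d (List.mem_cons_of_mem _ hd))]
    simp [pvEnc, if_pos hc]

-- B's run scanner flattened equals the flatMap normal form
theorem pv_scan_flatten (cs : List Char) : (pvScan cs).flatten = cs.flatMap pvEnc := by
  induction cs using pvScan.induct with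
  | case1 cs h =>
    rw [pvScan, h]
    have hsplit := List.takeWhile_append_dropWhile (p := pvIsAl) (l := cs)
    rw [h, List.append_nil] at hsplit
    conv_rhs => rw [← hsplit]
    rw [pv_flatMap_run _ (fun c hc => List.mem_takeWhile_imp hc)]
    simp
  | case2 cs c rest h ih =>
    rw [pvScan, h]
    have hsplit := List.takeWhile_append_dropWhile (p := pvIsAl) (l := cs)
    rw [h] at hsplit
    have hc : pvIsAl c = false := by
      have := List.head_dropWhile_not pvIsAl (l := cs) (by simp [h])
      simpa [h] using this
    conv_rhs => rw [← hsplit]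
    rw [List.flatMap_append, pv_flatMap_run _ (fun d hd => List.mem_takeWhile_imp hd),
        List.flatMap_cons]
    have hcne : ¬ (('a' ≤ c ∧ c ≤ 'z') ∨ ('A' ≤ c ∧ c ≤ 'Z') ∨ ('0' ≤ c ∧ c ≤ '9')) := by
      intro hp; rw [(pvIsAl_iff c).mpr hp] at hc; simp at hc
    simp [pvEnc, if_neg hcne, ih]

-- ===== VERDICT (by name: the statement is the Claim_ definition above) =====
theorem encode_for_xml_id_py_spec : Claim_equal_encode_for_xml_id_py := by
  intro text _
  show _ = _
  simp only [encode_for_xml_id_py, encode_for_xml_id_py_alt]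
  rw [pv_fold_flatten, pv_scan_flatten]
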